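-- pv_equiv track=rewrite | github.com/bennypowers/zmk-keyboard-toucan | boards/shields/nice_view_gem/assets/convert_sprites.py | mono_to_lvgl_c
-- ===== SOURCE A (Python) =====
-- def mono_to_lvgl_c(name, mono, w, h):
--     row_bytes = (w + 7) // 8
--     lines = []
--     lines.append(f"/* {name}: {w}x{h} */")
--     lines.append(
--         f"const LV_ATTRIBUTE_MEM_ALIGN LV_ATTRIBUTE_LARGE_CONST uint8_t {name}_map[] = {{"
--     )
--     lines.append("    0x00, 0x00, 0x00, 0x00, /*Color of index 0 (transparent)*/")
--     lines.append("    0xff, 0xff, 0xff, 0xff, /*Color of index 1*/")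
--     for y in range(h):
--         row_data = []
--         for byte_idx in range(row_bytes):
--             byte_val = 0
--             for bit in range(8):
--                 x = byte_idx * 8 + bit
--                 if x < w and mono[y][x]:
--                     byte_val |= 0x80 >> bit
--             row_data.append(byte_val)
--         hex_str = ", ".join(f"0x{b:02x}" for b in row_data)
--         lines.append(f"    {hex_str}, ")
--     lines.append("};")
--     lines.append("")
--     lines.append(f"const lv_img_dsc_t {name} = {{")
--     lines.append("    .header.cf = LV_IMG_CF_INDEXED_1BIT,")
--     lines.append("    .header.always_zero = 0,")
--     lines.append("    .header.reserved = 0,")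
--     lines.append(f"    .header.w = {w},")
--     lines.append(f"    .header.h = {h},")
--     data_size = 8 + row_bytes * h
--     lines.append(f"    .data_size = {data_size},")
--     lines.append(f"    .data = {name}_map,")
--     lines.append("};")
--     return "\n".join(lines)
-- ===== SOURCE B (Python) =====
-- def mono_to_lvgl_c(name, mono, w, h):
--     row_bytes = (w + 7) // 8
--     head = [
--         f"/* {name}: {w}x{h} */",
--         f"const LV_ATTRIBUTE_MEM_ALIGN LV_ATTRIBUTE_LARGE_CONST uint8_t {name}_map[] = {{",
--         "    0x00, 0x00, 0x00, 0x00, /*Color of index 0 (transparent)*/",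
--         "    0xff, 0xff, 0xff, 0xff, /*Color of index 1*/",
--     ]
--     body = []
--     for y in range(h):
--         bits = "".join("1" if mono[y][x] else "0" for x in range(w))
--         bits += "0" * (row_bytes * 8 - len(bits))
--         row = [int(bits[i * 8:(i + 1) * 8], 2) for i in range(row_bytes)]
--         body.append("    " + ", ".join("0x%02x" % b for b in row) + ", ")
--     tail = [
--         "};",
--         "",
--         f"const lv_img_dsc_t {name} = {{",
--         "    .header.cf = LV_IMG_CF_INDEXED_1BIT,",
--         "    .header.always_zero = 0,",
--         "    .header.reserved = 0,",
--         f"    .header.w = {w},",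
--         f"    .header.h = {h},",
--         f"    .data_size = {8 + row_bytes * h},",
--         f"    .data = {name}_map,",
--         "};",
--     ]
--     return "\n".join(head + body + tail)
-- ===== Notes on version B (the rewrite author's own statement) =====
-- stated objective: alternative
-- what changed: Each row's byte values are produced by building the row's full bit string ('1'/'0' per pixel, zero-padded to row_bytes*8) and parsing 8-character chunks with int(chunk, 2), instead of A's nested byte/bit loops OR-ing 0x80>>bit masks; the output is assembled as head+body+tail section lists joined once instead of sequential appends.
import Mathlib
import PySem

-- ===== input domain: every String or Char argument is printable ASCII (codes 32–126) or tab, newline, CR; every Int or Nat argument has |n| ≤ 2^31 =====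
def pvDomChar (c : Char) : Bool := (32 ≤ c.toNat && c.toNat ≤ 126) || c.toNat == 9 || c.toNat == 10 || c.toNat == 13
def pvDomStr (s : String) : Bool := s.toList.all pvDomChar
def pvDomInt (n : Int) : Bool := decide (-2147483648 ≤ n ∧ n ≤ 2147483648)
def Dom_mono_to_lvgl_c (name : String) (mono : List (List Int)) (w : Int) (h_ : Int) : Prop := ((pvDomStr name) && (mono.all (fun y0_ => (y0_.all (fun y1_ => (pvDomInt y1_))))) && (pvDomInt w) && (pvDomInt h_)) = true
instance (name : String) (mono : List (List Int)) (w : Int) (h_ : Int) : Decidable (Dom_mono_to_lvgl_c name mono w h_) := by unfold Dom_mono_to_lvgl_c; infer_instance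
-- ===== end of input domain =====

-- B packs each row as a padded '1'/'0' bit string parsed in 8-char chunks, instead of A's nested
-- byte/bit loops OR-ing 0x80>>bit masks; same cost, different decomposition (objective: alternative).

-- ===== PORT A =====
-- hand port of Python's f"0x{b:02x}" (= "0x%02x" % b); exact for 0 ≤ b ≤ 255, the only values formatted here
def pvHexByte (b : Int) : String :=
  "0x" ++ String.ofList [Nat.digitChar (b.toNat / 16 % 16), Nat.digitChar (b.toNat % 16)]

def pvByteValA (mono : List (List Int)) (w : Int) (y : Int) (byte_idx : Int) : Int :=
  (PySem.List.pyRange 0 8 1).foldl (fun byte_val bit =>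
    if byte_idx * 8 + bit < w ∧
        PySem.List.pyGetD (PySem.List.pyGetD mono y []) (byte_idx * 8 + bit) 0 ≠ 0 then
      PySem.Int.bor byte_val ((128 : Int) >>> bit.toNat)
    else byte_val) 0

def pvRowLineA (mono : List (List Int)) (w : Int) (row_bytes : Int) (y : Int) : String :=
  let row_data := (PySem.List.pyRange 0 row_bytes 1).foldl
    (fun rd byte_idx => rd ++ [pvByteValA mono w y byte_idx]) []
  "    " ++ PySem.Str.join ", " (row_data.map pvHexByte) ++ ", "

def mono_to_lvgl_c (name : String) (mono : List (List Int)) (w : Int) (h_ : Int) : String :=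
  let row_bytes := PySem.Int.floordiv (w + 7) 8
  let lines : List String := []
  let lines := lines ++ ["/* " ++ name ++ ": " ++ PySem.Int.toStr w ++ "x" ++ PySem.Int.toStr h_ ++ " */"]
  let lines := lines ++ ["const LV_ATTRIBUTE_MEM_ALIGN LV_ATTRIBUTE_LARGE_CONST uint8_t " ++ name ++ "_map[] = {"]
  let lines := lines ++ ["    0x00, 0x00, 0x00, 0x00, /*Color of index 0 (transparent)*/"]
  let lines := lines ++ ["    0xff, 0xff, 0xff, 0xff, /*Color of index 1*/"]
  let lines := (PySem.List.pyRange 0 h_ 1).foldl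
    (fun acc y => acc ++ [pvRowLineA mono w row_bytes y]) lines
  let lines := lines ++ ["};"]
  let lines := lines ++ [""]
  let lines := lines ++ ["const lv_img_dsc_t " ++ name ++ " = {"]
  let lines := lines ++ ["    .header.cf = LV_IMG_CF_INDEXED_1BIT,"]
  let lines := lines ++ ["    .header.always_zero = 0,"]
  let lines := lines ++ ["    .header.reserved = 0,"]
  let lines := lines ++ ["    .header.w = " ++ PySem.Int.toStr w ++ ","]
  let lines := lines ++ ["    .header.h = " ++ PySem.Int.toStr h_ ++ ","]
  let data_size := 8 + row_bytes * h_
  let lines := lines ++ ["    .data_size = " ++ PySem.Int.toStr data_size ++ ","]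
  let lines := lines ++ ["    .data = " ++ name ++ "_map,"]
  let lines := lines ++ ["};"]
  PySem.Str.join "\n" lines

def pvBitsB (mono : List (List Int)) (w : Int) (row_bytes : Int) (y : Int) : List Char :=
  let bits := (PySem.List.pyRange 0 w 1).map
    (fun x => if PySem.List.pyGetD (PySem.List.pyGetD mono y []) x 0 ≠ 0 then '1' else '0')
  bits ++ List.replicate (row_bytes * 8 - (bits.length : Int)).toNat '0'

-- int(chunk, 2); the chunk is always 8 chars of '0'/'1', so ofCharsBase? never returns none
def pvRowB (mono : List (List Int)) (w : Int) (row_bytes : Int) (y : Int) : List Int :=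
  (PySem.List.pyRange 0 row_bytes 1).map (fun i =>
    (PySem.Int.ofCharsBase?
      (PySem.List.slice (pvBitsB mono w row_bytes y) (some (i * 8)) (some ((i + 1) * 8))) 2).getD 0)

def pvRowLineB (mono : List (List Int)) (w : Int) (row_bytes : Int) (y : Int) : String :=
  "    " ++ PySem.Str.join ", " ((pvRowB mono w row_bytes y).map pvHexByte) ++ ", "

def mono_to_lvgl_c_alt (name : String) (mono : List (List Int)) (w : Int) (h_ : Int) : String :=
  let row_bytes := PySem.Int.floordiv (w + 7) 8
  let head : List String :=
    [ "/* " ++ name ++ ": " ++ PySem.Int.toStr w ++ "x" ++ PySem.Int.toStr h_ ++ " */",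
      "const LV_ATTRIBUTE_MEM_ALIGN LV_ATTRIBUTE_LARGE_CONST uint8_t " ++ name ++ "_map[] = {",
      "    0x00, 0x00, 0x00, 0x00, /*Color of index 0 (transparent)*/",
      "    0xff, 0xff, 0xff, 0xff, /*Color of index 1*/" ]
  let body := (PySem.List.pyRange 0 h_ 1).map (fun y => pvRowLineB mono w row_bytes y)
  let tail : List String :=
    [ "};",
      "",
      "const lv_img_dsc_t " ++ name ++ " = {",
      "    .header.cf = LV_IMG_CF_INDEXED_1BIT,",
      "    .header.always_zero = 0,",
      "    .header.reserved = 0,",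
      "    .header.w = " ++ PySem.Int.toStr w ++ ",",
      "    .header.h = " ++ PySem.Int.toStr h_ ++ ",",
      "    .data_size = " ++ PySem.Int.toStr (8 + row_bytes * h_) ++ ",",
      "    .data = " ++ name ++ "_map,",
      "};" ]
  PySem.Str.join "\n" (head ++ body ++ tail)



-- ===== PRECONDITION & SPEC =====
-- Pre_ is exactly where Python A returns: A (and B) index mono[y][x] for every 0 <= y < h_ and
-- 0 <= x < w (no indexing at all when w <= 0, by Python's short-circuit `and`); anything else raises IndexError.
def Pre_mono_to_lvgl_c (name : String) (mono : List (List Int)) (w : Int) (h_ : Int) : Prop :=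
  0 < w → h_ ≤ (mono.length : Int) ∧ ∀ row ∈ mono.take h_.toNat, w ≤ (row.length : Int)
instance (name : String) (mono : List (List Int)) (w : Int) (h_ : Int) : Decidable (Pre_mono_to_lvgl_c name mono w h_) := by unfold Pre_mono_to_lvgl_c; infer_instance

def pvWitness_mono_to_lvgl_c : String × List (List Int) × Int × Int := ("sprite", [[1, 0, 0], [0, 1, 0]], 3, 2)

def Spec_mono_to_lvgl_c (name : String) (mono : List (List Int)) (w : Int) (h_ : Int) (out : String) : Prop := out = mono_to_lvgl_c_alt name mono w h_
instance (name : String) (mono : List (List Int)) (w : Int) (h_ : Int) (out : String) : Decidable (Spec_mono_to_lvgl_c name mono w h_ out) := by unfold Spec_mono_to_lvgl_c; infer_instance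

-- ===== CLAIM (what is proved, stated in full; the proofs are below) =====
def Claim_equal_mono_to_lvgl_c : Prop := ∀ (name : String) (mono : List (List Int)) (w : Int) (h_ : Int), Dom_mono_to_lvgl_c name mono w h_ → Pre_mono_to_lvgl_c name mono w h_ → Spec_mono_to_lvgl_c name mono w h_ (mono_to_lvgl_c name mono w h_)

-- ===== LEMMAS AND PROOFS =====
theorem pv_bits_eq (mono : List (List Int)) (w rb y : Int) (hw : 0 ≤ w) (hle : w ≤ rb * 8) :
    pvBitsB mono w rb y = (List.range (rb * 8).toNat).map
      (fun (k : Nat) => if ((k : Int) < w ∧ PySem.List.pyGetD (PySem.List.pyGetD mono y []) (k : Int) 0 ≠ 0)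
        then '1' else '0') := by
  unfold pvBitsB
  rw [PySem.List.pyRange_one]
  apply List.ext_getElem
  · simp; omega
  · intro k hk1 hk2
    simp only [List.length_append, List.length_map, List.length_range] at hk1
    by_cases hkw : k < w.toNat
    · rw [List.getElem_append_left (by simpa using hkw)]
      simp only [List.getElem_map, List.getElem_range]
      have : (k : Int) < w := by omega
      simp [this]
    · rw [List.getElem_append_right (by simpa using hkw)]
      simp only [List.getElem_replicate, List.getElem_map, List.getElem_range]
      have : ¬ ((k : Int) < w) := by omega
      simp [this]

theorem pv_chunk_eq (mono : List (List Int)) (w rb y i : Int) (hw : 0 ≤ w) (hle : w ≤ rb * 8)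
    (h0 : 0 ≤ i) (hi : i < rb) :
    PySem.List.slice (pvBitsB mono w rb y) (some (i * 8)) (some ((i + 1) * 8)) =
      (List.range 8).map (fun (j : Nat) =>
        if (i * 8 + (j : Int) < w ∧
            PySem.List.pyGetD (PySem.List.pyGetD mono y []) (i * 8 + (j : Int)) 0 ≠ 0)
          then '1' else '0') := by
  rw [pv_bits_eq mono w rb y hw hle,
    PySem.List.slice_toNat _ (by positivity) (by positivity)]
  apply List.ext_getElem
  · simp; omega
  · intro j hj1 hj2
    simp only [List.length_range, List.length_map] at hj2
    rw [List.getElem_take, List.getElem_drop]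
    simp only [List.getElem_map, List.getElem_range]
    have hidx : (((i * 8).toNat + j : Nat) : Int) = i * 8 + (j : Int) := by
      push_cast; omega
    rw [hidx]

theorem pv_byte_core (Q : Int → Prop) [DecidablePred Q] (a : Int) :
    ([0, 1, 2, 3, 4, 5, 6, 7] : List Int).foldl
      (fun v bit => if Q (a + bit) then PySem.Int.bor v ((128 : Int) >>> bit.toNat) else v) 0 =
    (PySem.Int.ofCharsBase?
      ((List.range 8).map (fun (j : Nat) => if Q (a + (j : Int)) then '1' else '0')) 2).getD 0 := by
  by_cases h0 : Q a <;> by_cases h1 : Q (a + 1) <;> by_cases h2 : Q (a + 2) <;>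
    by_cases h3 : Q (a + 3) <;> by_cases h4 : Q (a + 4) <;> by_cases h5 : Q (a + 5) <;>
    by_cases h6 : Q (a + 6) <;> by_cases h7 : Q (a + 7) <;>
    simp [List.foldl, List.range_succ, h0, h1, h2, h3, h4, h5, h6, h7] <;> decide

theorem pv_byte_eq (mono : List (List Int)) (w rb y i : Int) (hw : 0 ≤ w) (hle : w ≤ rb * 8)
    (h0 : 0 ≤ i) (hi : i < rb) :
    pvByteValA mono w y i =
      (PySem.Int.ofCharsBase?
        (PySem.List.slice (pvBitsB mono w rb y) (some (i * 8)) (some ((i + 1) * 8))) 2).getD 0 := by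
  rw [pv_chunk_eq mono w rb y i hw hle h0 hi]
  unfold pvByteValA
  have hr : PySem.List.pyRange 0 8 1 = [0, 1, 2, 3, 4, 5, 6, 7] := by decide
  rw [hr]
  exact pv_byte_core
    (fun x => x < w ∧ PySem.List.pyGetD (PySem.List.pyGetD mono y []) x 0 ≠ 0) (i * 8)

theorem pv_row_eq (mono : List (List Int)) (w y : Int) :
    pvRowLineA mono w (PySem.Int.floordiv (w + 7) 8) y =
      pvRowLineB mono w (PySem.Int.floordiv (w + 7) 8) y := by
  set rb := PySem.Int.floordiv (w + 7) 8 with hrb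
  unfold pvRowLineA pvRowLineB pvRowB
  rw [PySem.List.foldl_append_singleton_eq_map]
  simp only [List.nil_append]
  have hmap : (PySem.List.pyRange 0 rb 1).map (pvByteValA mono w y) =
      (PySem.List.pyRange 0 rb 1).map (fun i =>
        (PySem.Int.ofCharsBase?
          (PySem.List.slice (pvBitsB mono w rb y) (some (i * 8)) (some ((i + 1) * 8))) 2).getD 0) := by
    apply List.map_congr_left
    intro i hi
    rw [PySem.List.mem_pyRange_one] at hi
    have hb := (PySem.Int.floordiv_eq_iff_of_pos (by norm_num : (0:Int) < 8)).mp hrb.symm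
    exact pv_byte_eq mono w rb y i (by omega) (by omega) hi.1 hi.2
  rw [hmap]

theorem pv_main (name : String) (mono : List (List Int)) (w h_ : Int) :
    mono_to_lvgl_c name mono w h_ = mono_to_lvgl_c_alt name mono w h_ := by
  unfold mono_to_lvgl_c mono_to_lvgl_c_alt
  dsimp only
  rw [PySem.List.foldl_append_singleton_eq_map]
  have hmap : (PySem.List.pyRange 0 h_ 1).map
        (fun y => pvRowLineA mono w (PySem.Int.floordiv (w + 7) 8) y) =
      (PySem.List.pyRange 0 h_ 1).map
        (fun y => pvRowLineB mono w (PySem.Int.floordiv (w + 7) 8) y) :=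
    List.map_congr_left fun y _ => pv_row_eq mono w y
  rw [hmap]
  simp [List.append_assoc]

-- ===== VERDICT (by name: the statement is the Claim_ definition above) =====
theorem mono_to_lvgl_c_spec : Claim_equal_mono_to_lvgl_c := by
  intro name mono w h_ _ _
  unfold Spec_mono_to_lvgl_c
  exact pv_main name mono w h_
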